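-- pv_equiv track=rewrite | github.com/broken-byte/HR_test_environment_with_solutions | searching/medium_problems/triple_sum/optimized_triple_sum.py | optimized_triple_sum
-- ===== SOURCE A (Python) =====
-- def optimized_triple_sum(a: list, b: list, c: list) -> int:
--     triplet: list = []
--     triplets: set = set([])
--     sorted_a: list = sorted(a)
--     sorted_b: list = sorted(b, reverse=True)
--     sorted_c: list = sorted(c)
--     for p in sorted_a:
--         triplet.clear()
--         triplet.append(p)
--         for q in sorted_b:
--             if p <= q:  # keep going
--                 triplet.append(q)
--             else:
--                 break
--             for r in sorted_c:
--                 if q >= r: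
--                     triplet.append(r)
--                     hash_triplet: tuple = tuple(triplet)
--                     if hash_triplet not in triplets:
--                         triplets.add(hash_triplet)
--                     triplet.pop()
--                 else:
--                     break
--             triplet.pop()  # remove old q
--     return len(triplets)
-- ===== SOURCE B (Python) =====
-- def optimized_triple_sum(a: list, b: list, c: list) -> int:
--     # Count distinct (p, q, r) with p in a, r in c, p <= q and r <= q, grouped by q:
--     # for each distinct q, multiply the number of distinct p <= q by distinct r <= q.
--     distinct_a = set(a)
--     distinct_c = set(c)
--     total = 0
--     for q in set(b):
--         total += sum(1 for p in distinct_a if p <= q) * sum(1 for r in distinct_c if r <= q)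
--     return total
-- ===== Notes on version B (the rewrite author's own statement) =====
-- stated objective: faster
-- what changed: B replaces A's triple nested loop that enumerates every qualifying triplet into a set by a single pass over the distinct q values, adding the product of the counts of distinct a-elements <= q and distinct c-elements <= q.
import Mathlib
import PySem

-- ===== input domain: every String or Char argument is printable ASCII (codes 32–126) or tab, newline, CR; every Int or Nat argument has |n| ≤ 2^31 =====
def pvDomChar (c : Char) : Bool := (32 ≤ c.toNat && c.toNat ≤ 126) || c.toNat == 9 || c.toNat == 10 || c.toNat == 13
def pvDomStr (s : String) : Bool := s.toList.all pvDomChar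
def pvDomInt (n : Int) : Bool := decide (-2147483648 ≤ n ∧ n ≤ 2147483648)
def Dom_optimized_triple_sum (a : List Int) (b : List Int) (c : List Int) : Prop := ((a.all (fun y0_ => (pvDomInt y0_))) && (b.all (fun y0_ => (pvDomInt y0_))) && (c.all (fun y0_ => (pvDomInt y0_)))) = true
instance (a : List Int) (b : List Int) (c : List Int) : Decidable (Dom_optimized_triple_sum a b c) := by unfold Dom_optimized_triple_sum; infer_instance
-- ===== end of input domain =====

-- B replaces A's triple nested enumeration of triplets into a set by a per-distinct-q
-- product of counts (objective: faster).

-- ===== PORT A =====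
-- inner 'for r in sorted_c' loop with its break (q >= r keeps going)
def pvA_loopC (p q : Int) (cs : List Int) (trips : PySem.Set (List Int)) :
    PySem.Set (List Int) :=
  match cs with
  | [] => trips
  | r :: rest =>
    if q ≥ r then
      let t := [p, q, r]
      let trips' := if PySem.Set.contains trips t then trips else PySem.Set.add trips t
      pvA_loopC p q rest trips'
    else trips

-- middle 'for q in sorted_b' loop with its break (p <= q keeps going)
def pvA_loopB (p : Int) (bs cs : List Int) (trips : PySem.Set (List Int)) :
    PySem.Set (List Int) :=
  match bs with
  | [] => trips
  | q :: rest =>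
    if p ≤ q then pvA_loopB p rest cs (pvA_loopC p q cs trips) else trips

def optimized_triple_sum (a : List Int) (b : List Int) (c : List Int) : Int :=
  let sorted_a := PySem.List.sorted a (fun x => x) false
  let sorted_b := PySem.List.sorted b (fun x => x) true
  let sorted_c := PySem.List.sorted c (fun x => x) false
  let triplets := sorted_a.foldl (fun trips p => pvA_loopB p sorted_b sorted_c trips)
    PySem.Set.empty
  (triplets.length : Int)

-- ===== PORT B =====
-- sum(1 for x in s if x <= q)
def pvB_cnt (s : PySem.Set Int) (q : Int) : Int :=
  s.foldl (fun acc x => if x ≤ q then acc + 1 else acc) 0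

def optimized_triple_sum_alt (a : List Int) (b : List Int) (c : List Int) : Int :=
  let distinct_a := PySem.Set.ofList a
  let distinct_c := PySem.Set.ofList c
  (PySem.Set.ofList b).foldl
    (fun total q => total + pvB_cnt distinct_a q * pvB_cnt distinct_c q) 0

-- ===== PRECONDITION & SPEC =====
def Spec_optimized_triple_sum (a : List Int) (b : List Int) (c : List Int) (out : Int) : Prop := out = optimized_triple_sum_alt a b c
instance (a : List Int) (b : List Int) (c : List Int) (out : Int) : Decidable (Spec_optimized_triple_sum a b c out) := by unfold Spec_optimized_triple_sum; infer_instance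

-- ===== CLAIM (what is proved, stated in full; the proofs are below) =====
def Claim_equal_optimized_triple_sum : Prop := ∀ (a : List Int) (b : List Int) (c : List Int), Dom_optimized_triple_sum a b c → Spec_optimized_triple_sum a b c (optimized_triple_sum a b c)

-- ===== LEMMAS AND PROOFS =====

-- membership after the inner c-loop, given sorted_c ascending
theorem pvA_loopC_mem (p q : Int) (cs : List Int) (hs : cs.Pairwise (· ≤ ·))
    (trips : PySem.Set (List Int)) (x : List Int) :
    x ∈ pvA_loopC p q cs trips ↔ x ∈ trips ∨ ∃ r ∈ cs, r ≤ q ∧ x = [p, q, r] := by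
  induction cs generalizing trips with
  | nil => simp [pvA_loopC]
  | cons r rest ih =>
    rw [List.pairwise_cons] at hs
    by_cases h : q ≥ r
    · rw [pvA_loopC, if_pos h, ih hs.2]
      by_cases hc : PySem.Set.contains trips [p, q, r] = true
      · rw [if_pos hc]
        rw [PySem.Set.contains_iff] at hc
        constructor
        · rintro (hx | ⟨r', hr', hle, rfl⟩)
          · exact Or.inl hx
          · exact Or.inr ⟨r', List.mem_cons_of_mem _ hr', hle, rfl⟩
        · rintro (hx | ⟨r', hr', hle, rfl⟩)
          · exact Or.inl hx
          · rcases List.mem_cons.mp hr' with rfl | hr'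
            · exact Or.inl hc
            · exact Or.inr ⟨r', hr', hle, rfl⟩
      · rw [if_neg hc]
        simp only [PySem.Set.mem_add, List.mem_cons]
        constructor
        · rintro (⟨hx | rfl⟩ | ⟨r', hr', hle, rfl⟩)
          · exact Or.inl hx
          · exact Or.inr ⟨r, Or.inl rfl, h, rfl⟩
          · exact Or.inr ⟨r', Or.inr hr', hle, rfl⟩
        · rintro (hx | ⟨r', rfl | hr', hle, rfl⟩)
          · exact Or.inl (Or.inl hx)
          · exact Or.inl (Or.inr rfl)
          · exact Or.inr ⟨r', hr', hle, rfl⟩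
    · rw [pvA_loopC, if_neg h]
      push Not at h
      constructor
      · exact Or.inl
      · rintro (hx | ⟨r', hr', hle, rfl⟩)
        · exact hx
        · rcases List.mem_cons.mp hr' with rfl | hr'
          · omega
          · have := hs.1 r' hr'; omega

-- membership after the middle b-loop, given sorted_b descending and sorted_c ascending
theorem pvA_loopB_mem (p : Int) (bs cs : List Int) (hb : bs.Pairwise (· ≥ ·))
    (hc : cs.Pairwise (· ≤ ·)) (trips : PySem.Set (List Int)) (x : List Int) :
    x ∈ pvA_loopB p bs cs trips ↔
      x ∈ trips ∨ ∃ q ∈ bs, p ≤ q ∧ ∃ r ∈ cs, r ≤ q ∧ x = [p, q, r] := by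
  induction bs generalizing trips with
  | nil => simp [pvA_loopB]
  | cons q rest ih =>
    rw [List.pairwise_cons] at hb
    by_cases h : p ≤ q
    · rw [pvA_loopB, if_pos h, ih hb.2, pvA_loopC_mem p q cs hc]
      constructor
      · rintro ((hx | ⟨r, hr, hle, rfl⟩) | ⟨q', hq', hpq, hrest⟩)
        · exact Or.inl hx
        · exact Or.inr ⟨q, List.mem_cons_self .., h, r, hr, hle, rfl⟩
        · exact Or.inr ⟨q', List.mem_cons_of_mem _ hq', hpq, hrest⟩
      · rintro (hx | ⟨q', hq', hpq, hrest⟩)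
        · exact Or.inl (Or.inl hx)
        · rcases List.mem_cons.mp hq' with rfl | hq'
          · exact Or.inl (Or.inr hrest)
          · exact Or.inr ⟨q', hq', hpq, hrest⟩
    · rw [pvA_loopB, if_neg h]
      push Not at h
      constructor
      · exact Or.inl
      · rintro (hx | ⟨q', hq', hpq, _⟩)
        · exact hx
        · rcases List.mem_cons.mp hq' with rfl | hq'
          · omega
          · have := hb.1 q' hq'; omega

theorem pvA_fold_mem (as bs cs : List Int) (hb : bs.Pairwise (· ≥ ·))
    (hc : cs.Pairwise (· ≤ ·)) (trips : PySem.Set (List Int)) (x : List Int) :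
    x ∈ as.foldl (fun t p => pvA_loopB p bs cs t) trips ↔
      x ∈ trips ∨ ∃ p ∈ as, ∃ q ∈ bs, p ≤ q ∧ ∃ r ∈ cs, r ≤ q ∧ x = [p, q, r] := by
  induction as generalizing trips with
  | nil => simp
  | cons p rest ih =>
    rw [List.foldl_cons, ih, pvA_loopB_mem p bs cs hb hc]
    constructor
    · rintro ((hx | h) | ⟨p', hp', h⟩)
      · exact Or.inl hx
      · exact Or.inr ⟨p, List.mem_cons_self .., h⟩
      · exact Or.inr ⟨p', List.mem_cons_of_mem _ hp', h⟩
    · rintro (hx | ⟨p', hp', h⟩)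
      · exact Or.inl (Or.inl hx)
      · rcases List.mem_cons.mp hp' with rfl | hp'
        · exact Or.inl (Or.inr h)
        · exact Or.inr ⟨p', hp', h⟩

-- the loops preserve Nodup
theorem pvA_loopC_nodup (p q : Int) (cs : List Int) (trips : PySem.Set (List Int))
    (h : trips.Nodup) : (pvA_loopC p q cs trips).Nodup := by
  induction cs generalizing trips with
  | nil => simpa [pvA_loopC]
  | cons r rest ih =>
    rw [pvA_loopC]
    split
    · apply ih
      split
      · exact h
      · exact PySem.Set.nodup_add _ _ h
    · exact h

theorem pvA_loopB_nodup (p : Int) (bs cs : List Int) (trips : PySem.Set (List Int))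
    (h : trips.Nodup) : (pvA_loopB p bs cs trips).Nodup := by
  induction bs generalizing trips with
  | nil => simpa [pvA_loopB]
  | cons q rest ih =>
    rw [pvA_loopB]
    split
    · exact ih _ (pvA_loopC_nodup p q cs trips h)
    · exact h

theorem pvA_fold_nodup (as bs cs : List Int) (trips : PySem.Set (List Int))
    (h : trips.Nodup) :
    (as.foldl (fun t p => pvA_loopB p bs cs t) trips).Nodup := by
  induction as generalizing trips with
  | nil => simpa
  | cons p rest ih => exact ih _ (pvA_loopB_nodup p bs cs trips h)

-- the reference nodup list of all qualifying triples, grouped by distinct q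
def pvM (a b c : List Int) : List (List Int) :=
  (PySem.Set.ofList b).flatMap (fun q =>
    ((PySem.Set.ofList a).filter (fun p => decide (p ≤ q))).flatMap (fun p =>
      ((PySem.Set.ofList c).filter (fun r => decide (r ≤ q))).map (fun r => [p, q, r])))

theorem pvM_mem (a b c : List Int) (x : List Int) :
    x ∈ pvM a b c ↔ ∃ p ∈ a, ∃ q ∈ b, p ≤ q ∧ ∃ r ∈ c, r ≤ q ∧ x = [p, q, r] := by
  simp only [pvM, List.mem_flatMap, List.mem_filter, List.mem_map, PySem.Set.mem_ofList,
    decide_eq_true_eq]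
  constructor
  · rintro ⟨q, hq, p, ⟨hp, hpq⟩, r, ⟨hr, hrq⟩, rfl⟩
    exact ⟨p, hp, q, hq, hpq, r, hr, hrq, rfl⟩
  · rintro ⟨p, hp, q, hq, hpq, r, hr, hrq, rfl⟩
    exact ⟨q, hq, p, ⟨hp, hpq⟩, r, ⟨hr, hrq⟩, rfl⟩

theorem pvM_nodup (a b c : List Int) : (pvM a b c).Nodup := by
  rw [pvM, List.nodup_flatMap]
  refine ⟨fun q _ => ?_, ?_⟩
  · rw [List.nodup_flatMap]
    refine ⟨fun p _ => ?_, ?_⟩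
    · exact List.Nodup.map (fun r r' h => by simpa using h)
        ((PySem.Set.nodup_ofList c).filter _)
    · refine ((PySem.Set.nodup_ofList a).filter _).pairwise_of_forall_ne ?_
      rintro p p' _ _ hne x hx hx'
      simp only [List.mem_map] at hx hx'
      obtain ⟨r, _, rfl⟩ := hx
      obtain ⟨r', _, h⟩ := hx'
      exact hne (by simpa using congrArg (fun l => l.headI) h.symm)
  · refine (PySem.Set.nodup_ofList b).pairwise_of_forall_ne ?_
    rintro q q' _ _ hne x hx hx'
    simp only [List.mem_flatMap, List.mem_map] at hx hx'
    obtain ⟨p, _, r, _, rfl⟩ := hx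
    obtain ⟨p', _, r', _, h⟩ := hx'
    exact hne (by simpa using congrArg (fun l => l.tail.headI) h.symm)

-- length of pvM = B's sum of per-q products
theorem pvM_length (a b c : List Int) :
    ((pvM a b c).length : Int) =
      ((PySem.Set.ofList b).map (fun q =>
        (((PySem.Set.ofList a).filter (fun p => decide (p ≤ q))).length : Int) *
        (((PySem.Set.ofList c).filter (fun r => decide (r ≤ q))).length : Int))).sum := by
  rw [pvM, List.length_flatMap]
  rw [Nat.cast_list_sum, List.map_map]
  congr 1
  apply List.map_congr_left
  intro q _
  simp only [Function.comp_apply, List.length_flatMap, List.length_map]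
  rw [List.map_const', List.sum_replicate, smul_eq_mul]
  push_cast
  ring

-- B's counter is a filter length
theorem pvB_cnt_eq (s : PySem.Set Int) (q : Int) :
    pvB_cnt s q = ((s.filter (fun x => decide (x ≤ q))).length : Int) := by
  rw [pvB_cnt, PySem.List.foldl_ite_add_one]
  simp [List.countP_eq_length_filter]

-- ===== VERDICT (by name: the statement is the Claim_ definition above) =====
theorem optimized_triple_sum_spec : Claim_equal_optimized_triple_sum := by
  intro a b c _
  simp only [Spec_optimized_triple_sum, optimized_triple_sum, optimized_triple_sum_alt]
  -- A's set has the same members as pvM a b c, and both are Nodup, hence a Perm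
  have hA : ∀ x, x ∈ (PySem.List.sorted a (fun x => x) false).foldl
      (fun trips p => pvA_loopB p (PySem.List.sorted b (fun x => x) true)
        (PySem.List.sorted c (fun x => x) false) trips) PySem.Set.empty ↔
      x ∈ pvM a b c := by
    intro x
    rw [pvA_fold_mem _ _ _ (PySem.List.sorted_pairwise_rev b (fun x => x))
      (PySem.List.sorted_pairwise c (fun x => x)), pvM_mem]
    simp [PySem.List.mem_sorted, PySem.Set.empty]
  have hperm : ((PySem.List.sorted a (fun x => x) false).foldl
      (fun trips p => pvA_loopB p (PySem.List.sorted b (fun x => x) true)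
        (PySem.List.sorted c (fun x => x) false) trips) PySem.Set.empty).Perm
      (pvM a b c) :=
    (List.perm_ext_iff_of_nodup
      (pvA_fold_nodup _ _ _ _ (by simp [PySem.Set.empty]))
      (pvM_nodup a b c)).mpr hA
  rw [hperm.length_eq, pvM_length]
  rw [PySem.List.foldl_add (g := fun q =>
    pvB_cnt (PySem.Set.ofList a) q * pvB_cnt (PySem.Set.ofList c) q)]
  simp only [pvB_cnt_eq, zero_add]
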